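-- pv_equiv track=rewrite | github.com/koki-ota0/atcoder_test | 20230708/d.py | bfs
-- ===== SOURCE A (Python) =====
-- from collections import deque
--
-- def bfs(graph, start):
--     # 各頂点の訪問状態を初期化
--     visited = [False] * len(graph)
--     # 距離を記録する配列を初期化し、start位置の距離を0とする
--     distance = [float('inf')] * len(graph)
--     distance[start] = 0
--
--     # BFSによる探索のためのキューを作成し、start位置を追加
--     queue = deque([start])
--     visited[start] = True
--
--     while queue:
--         # キューの先頭から頂点を取り出す
--         current = queue.popleft()
--
--         # 隣接する頂点を探索
--         for neighbor in graph[current]: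
--             if not visited[neighbor]:
--                 # 隣接する頂点を未訪問状態から訪問済み状態に変更
--                 visited[neighbor] = True
--                 # 距離を更新
--                 distance[neighbor] = distance[current] + 1
--                 # 隣接する頂点をキューに追加
--                 queue.append(neighbor)
--
--     for i in range(len(distance)):
--         if distance[i] == float('inf'):
--             distance[i] = -1
--     return max(distance)
-- ===== SOURCE B (Python) =====
-- def bfs(graph, start):
--     # Level-synchronous BFS: the answer is the index of the deepest non-empty
--     # BFS layer (start is always at depth 0, so A's -1 entries never win).
--     visited = [False] * len(graph)
--     visited[start] = True
--     frontier = [start]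
--     depth = 0
--     while frontier:
--         nxt = []
--         for u in frontier:
--             for v in graph[u]:
--                 if not visited[v]:
--                     visited[v] = True
--                     nxt.append(v)
--         frontier = nxt
--         if frontier:
--             depth += 1
--     return depth
-- ===== Notes on version B (the rewrite author's own statement) =====
-- stated objective: alternative
-- what changed: Replaces queue-based BFS with a distance array, inf sentinels, a -1 rewrite pass and a final max() by level-synchronous BFS over frontier layers that only counts non-empty layers and returns the deepest level reached.
-- outside the precondition, e.g. on bfs([[0], [5]], 0): A returns 0, B returns 0
import Mathlib
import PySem

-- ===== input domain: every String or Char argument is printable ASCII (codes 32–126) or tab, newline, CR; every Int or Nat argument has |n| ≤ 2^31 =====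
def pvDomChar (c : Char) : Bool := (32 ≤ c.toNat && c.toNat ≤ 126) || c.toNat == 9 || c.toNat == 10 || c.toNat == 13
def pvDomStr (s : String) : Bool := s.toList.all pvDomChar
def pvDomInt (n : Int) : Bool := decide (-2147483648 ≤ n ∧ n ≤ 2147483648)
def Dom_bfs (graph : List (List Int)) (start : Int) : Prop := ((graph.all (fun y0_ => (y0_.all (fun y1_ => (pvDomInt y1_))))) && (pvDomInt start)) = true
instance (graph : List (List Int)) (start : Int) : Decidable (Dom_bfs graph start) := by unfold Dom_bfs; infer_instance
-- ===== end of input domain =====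

-- B replaces A's queue BFS (distance array, inf sentinels, -1 rewrite pass, final max) by
-- level-synchronous BFS returning the index of the deepest non-empty layer.

-- ===== PORT A =====
-- Distances are `Option Int`: `none` is Python's float('inf') (inf is only ever propagated by
-- `Option.map (+1)` or tested at the end, exactly as inf behaves in A's code).
-- The body of A's `for neighbor in graph[current]` loop:
def bfsRelax (current : Int) (s : List Bool × List (Option Int) × List Int) (neighbor : Int) :
    List Bool × List (Option Int) × List Int :=
  if PySem.List.pyGetD s.1 neighbor false then s
  else (PySem.List.pySetD s.1 neighbor true,
        PySem.List.pySetD s.2.1 neighbor ((PySem.List.pyGetD s.2.1 current none).map (· + 1)),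
        s.2.2 ++ [neighbor])

-- A's `while queue:` loop; one iteration = one fuel unit. Fuel `len(graph) + 1` suffices on
-- Pre_ inputs because every dequeued vertex was enqueued exactly when first marked visited.
def bfsLoop (graph : List (List Int)) : Nat → List Bool → List (Option Int) → List Int → List (Option Int)
  | 0, _, dist, _ => dist
  | _, _, dist, [] => dist
  | Nat.succ fuel, visited, dist, current :: rest =>
      let s := (PySem.List.pyGetD graph current []).foldl (bfsRelax current) (visited, dist, rest)
      bfsLoop graph fuel s.1 s.2.1 s.2.2

def bfs (graph : List (List Int)) (start : Int) : Int :=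
  let n := graph.length
  let visited := PySem.List.pySetD (List.replicate n false) start true
  let distance := PySem.List.pySetD (List.replicate n (none : Option Int)) start (some 0)
  let final := bfsLoop graph (n + 1) visited distance [start]
  -- `for i in range(len(distance)): if distance[i] == inf: distance[i] = -1` — an index loop
  -- rewriting each cell independently, i.e. a map over the list.
  let replaced := final.map (fun o => o.getD (-1))
  -- max(distance); Python raises on an empty list — excluded by Pre_ (start must be in range).
  (PySem.List.max? replaced (fun x => x)).getD 0

-- ===== PORT B =====
-- body of B's `for v in graph[u]` loop:
def bfsAltInner (s : List Bool × List Int) (v : Int) : List Bool × List Int :=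
  if PySem.List.pyGetD s.1 v false then s
  else (PySem.List.pySetD s.1 v true, s.2 ++ [v])

-- body of B's `for u in frontier` loop:
def bfsAltGather (graph : List (List Int)) (s : List Bool × List Int) (u : Int) :
    List Bool × List Int :=
  (PySem.List.pyGetD graph u []).foldl bfsAltInner s

-- B's `while frontier:` loop; one iteration = one fuel unit. Fuel `len(graph) + 1` suffices on
-- Pre_ inputs because every iteration that recurses marks at least one new cell visited.
def bfsAltLoop (graph : List (List Int)) : Nat → List Bool → List Int → Int → Int
  | 0, _, _, depth => depth
  | _, _, [], depth => depth
  | Nat.succ fuel, visited, frontier, depth =>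
      let s := frontier.foldl (bfsAltGather graph) (visited, [])
      if s.2 = [] then depth else bfsAltLoop graph fuel s.1 s.2 (depth + 1)

def bfs_alt (graph : List (List Int)) (start : Int) : Int :=
  let n := graph.length
  let visited := PySem.List.pySetD (List.replicate n false) start true
  bfsAltLoop graph (n + 1) visited [start] 0

-- ===== PRECONDITION & SPEC =====
-- Pre_ restricts to vertex ids that index the adjacency list without IndexError (Python allows
-- -n..n-1, negative ids wrapping around; both programs index the same arrays, so they agree
-- there too). A vertex id outside that range makes A raise IndexError when it is reached;
-- Pre_ checks every entry, so it also excludes graphs whose only out-of-range ids sit in rows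
-- BFS never reaches — there A and B return the same value (see the cited excluded example).
def Pre_bfs (graph : List (List Int)) (start : Int) : Prop :=
  -(graph.length : Int) ≤ start ∧ start < (graph.length : Int) ∧
    ∀ nbrs ∈ graph, ∀ v ∈ nbrs, -(graph.length : Int) ≤ v ∧ v < (graph.length : Int)
instance (graph : List (List Int)) (start : Int) : Decidable (Pre_bfs graph start) := by
  unfold Pre_bfs; infer_instance

def pvWitness_bfs : List (List Int) × Int := ([[1], [0, 1]], 0)

def Spec_bfs (graph : List (List Int)) (start : Int) (out : Int) : Prop := out = bfs_alt graph start
instance (graph : List (List Int)) (start : Int) (out : Int) : Decidable (Spec_bfs graph start out) := by unfold Spec_bfs; infer_instance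

-- ===== CLAIM (what is proved, stated in full; the proofs are below) =====
def Claim_equal_bfs : Prop := ∀ (graph : List (List Int)) (start : Int), Dom_bfs graph start → Pre_bfs graph start → Spec_bfs graph start (bfs graph start)

-- ===== LEMMAS AND PROOFS =====

-- the array cell a Python index -n ≤ i < n addresses (negative indices wrap)
def wrapIdx (n : Nat) (i : Int) : Nat := if 0 ≤ i then i.toNat else n - (-i).toNat

-- A's final pass and max, as one function of the distance array.
def bfsFinish (final : List (Option Int)) : Int :=
  (PySem.List.max? (final.map (fun o => o.getD (-1))) (fun x => x)).getD 0

lemma wrapIdx_lt (n : Nat) (i : Int) (h1 : -(n : Int) ≤ i) (h2 : i < (n : Int)) :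
    wrapIdx n i < n := by
  unfold wrapIdx; split <;> omega

lemma pyGetD_toNat {α : Type} (xs : List α) (i : Int) (d : α) (h : 0 ≤ i) :
    PySem.List.pyGetD xs i d = xs.getD i.toNat d := by
  conv_lhs => rw [← Int.toNat_of_nonneg h]
  rw [PySem.List.pyGetD_natCast]

lemma pyGetD_wrap {α : Type} (xs : List α) (i : Int) (d : α)
    (h1 : -(xs.length : Int) ≤ i) (_h2 : i < (xs.length : Int)) :
    PySem.List.pyGetD xs i d = xs.getD (wrapIdx xs.length i) d := by
  by_cases h : 0 ≤ i
  · rw [pyGetD_toNat _ _ _ h]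
    simp [wrapIdx, h]
  · have hk0 : 0 < (-i).toNat := by omega
    have hk1 : (-i).toNat ≤ xs.length := by omega
    have hw : wrapIdx xs.length i = xs.length - (-i).toNat := by simp [wrapIdx, h]
    have hi : i = -(((-i).toNat : Nat) : Int) := by omega
    rw [hw, List.getD_eq_getElem _ _ (by omega)]
    conv_lhs => rw [hi]
    rw [PySem.List.pyGetD_neg_natCast xs _ d hk0 hk1]

lemma pySetD_wrap {α : Type} (xs : List α) (i : Int) (v : α)
    (h1 : -(xs.length : Int) ≤ i) (h2 : i < (xs.length : Int)) :
    PySem.List.pySetD xs i v = xs.set (wrapIdx xs.length i) v := by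
  unfold PySem.List.pySetD PySem.List.pySet? PySem.List.pyIdx? wrapIdx
  split_ifs with ha <;> simp_all

lemma getD_set_ne {α : Type} (l : List α) (i j : Nat) (a d : α) (hij : i ≠ j) :
    (l.set i a).getD j d = l.getD j d := by
  simp [List.getD_eq_getElem?_getD, List.getElem?_set_ne hij]

lemma getD_set_self {α : Type} (l : List α) (i : Nat) (a d : α) (h : i < l.length) :
    (l.set i a).getD i d = a := by
  simp [List.getD_eq_getElem?_getD, h]

lemma count_set_true (l : List Bool) : ∀ i : Nat, i < l.length → l.getD i false = false →
    (l.set i true).count true = l.count true + 1 := by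
  induction l with
  | nil => intro i h _; simp at h
  | cons b t ih =>
      intro i hi hf
      cases i with
      | zero =>
          have hb : b = false := by simpa using hf
          subst hb
          simp
      | succ j =>
          have := ih j (by simpa using hi) (by simpa using hf)
          simp [List.count_cons, this]
          cases b <;> simp

lemma bfsLoop_nil (graph : List (List Int)) (fuel : Nat) (vis : List Bool)
    (ds : List (Option Int)) : bfsLoop graph fuel vis ds [] = ds := by
  cases fuel <;> rfl

lemma bfsFinish_eq (l : List (Option Int)) (d : Int) (hd : 0 ≤ d) (hmem : some d ∈ l)
    (hb : ∀ k : Int, some k ∈ l → k ≤ d) : bfsFinish l = d := by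
  unfold bfsFinish
  have hdm : d ∈ l.map (fun o => o.getD (-1)) :=
    List.mem_map.mpr ⟨some d, hmem, rfl⟩
  have hub : ∀ y ∈ l.map (fun o => o.getD (-1)), y ≤ d := by
    intro y hy
    obtain ⟨o, ho, rfl⟩ := List.mem_map.mp hy
    cases o with
    | none => simp only [Option.getD_none]; omega
    | some k => simpa using hb k ho
  cases hml : l.map (fun o => o.getD (-1)) with
  | nil => rw [hml] at hdm; simp at hdm
  | cons x t =>
      rw [hml] at hdm hub
      rw [PySem.List.max?_id_cons]
      have h1 := PySem.List.le_foldl_max t x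
      have h2 := PySem.List.foldl_max_mem t x
      have hdle : d ≤ t.foldl max x := by
        rcases List.mem_cons.mp hdm with h | h
        · exact h ▸ h1.1
        · exact h1.2 d h
      have hled : t.foldl max x ≤ d := by
        rcases h2 with h | h
        · rw [h]; exact hub x List.mem_cons_self
        · exact hub _ (List.mem_cons_of_mem _ h)
      simp [le_antisymm hled hdle]

-- One adjacency list processed: A's relax fold and B's collect fold perform the same visits,
-- append the same fresh vertices t, and A writes distance d+1 exactly at t's cells.
lemma inner_step (n : Nat) (L : List Int) (current d : Int) :
    ∀ (vis : List Bool) (ds : List (Option Int)) (q nxt : List Int),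
    vis.length = n → ds.length = n →
    (∀ v ∈ L, -(n : Int) ≤ v ∧ v < (n : Int)) →
    -(n : Int) ≤ current → current < (n : Int) →
    vis.getD (wrapIdx n current) false = true →
    ds.getD (wrapIdx n current) none = some d →
    ∃ (vis' : List Bool) (ds' : List (Option Int)) (t : List Int),
      L.foldl (bfsRelax current) (vis, ds, q) = (vis', ds', q ++ t) ∧
      L.foldl bfsAltInner (vis, nxt) = (vis', nxt ++ t) ∧
      vis'.length = n ∧ ds'.length = n ∧
      vis'.count true = vis.count true + t.length ∧
      (∀ v ∈ t, -(n : Int) ≤ v ∧ v < (n : Int) ∧ vis'.getD (wrapIdx n v) false = true ∧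
        ds'.getD (wrapIdx n v) none = some (d + 1) ∧ vis.getD (wrapIdx n v) false = false) ∧
      (∀ j : Nat, (∀ v ∈ t, wrapIdx n v ≠ j) →
        ds'.getD j none = ds.getD j none ∧ vis'.getD j false = vis.getD j false) := by
  induction L with
  | nil =>
      intro vis ds q nxt h1 h2 _ _ _ _ _
      exact ⟨vis, ds, [], by simp, by simp, h1, h2, by simp, by simp, fun j _ => ⟨rfl, rfl⟩⟩
  | cons v L ih =>
      intro vis ds q nxt hlv hld hL hc0 hcn hcv hcd
      have hv0 : -(n : Int) ≤ v := (hL v List.mem_cons_self).1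
      have hvn : v < (n : Int) := (hL v List.mem_cons_self).2
      have hvw : wrapIdx n v < n := wrapIdx_lt n v hv0 hvn
      have hgv : PySem.List.pyGetD vis v false = vis.getD (wrapIdx n v) false := by
        rw [pyGetD_wrap vis v false (by omega) (by omega), hlv]
      have hsv : PySem.List.pySetD vis v true = vis.set (wrapIdx n v) true := by
        rw [pySetD_wrap vis v true (by omega) (by omega), hlv]
      rw [List.foldl_cons, List.foldl_cons]
      cases hvis : vis.getD (wrapIdx n v) false with
      | true =>
          -- cell already visited: both sides skip v
          have hA : bfsRelax current (vis, ds, q) v = (vis, ds, q) := by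
            show (if PySem.List.pyGetD vis v false = true then (vis, ds, q)
                  else (PySem.List.pySetD vis v true,
                        PySem.List.pySetD ds v ((PySem.List.pyGetD ds current none).map (· + 1)),
                        q ++ [v])) = (vis, ds, q)
            rw [hgv, hvis, if_pos rfl]
          have hB : bfsAltInner (vis, nxt) v = (vis, nxt) := by
            show (if PySem.List.pyGetD vis v false = true then (vis, nxt)
                  else (PySem.List.pySetD vis v true, nxt ++ [v])) = (vis, nxt)
            rw [hgv, hvis, if_pos rfl]
          rw [hA, hB]
          exact ih vis ds q nxt hlv hld (fun w hw => hL w (List.mem_cons_of_mem _ hw))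
            hc0 hcn hcv hcd
      | false =>
          -- fresh cell: both sides mark it and append v
          have hsd : PySem.List.pySetD ds v ((PySem.List.pyGetD ds current none).map (· + 1)) =
              ds.set (wrapIdx n v) (some (d + 1)) := by
            have hgc : PySem.List.pyGetD ds current none = some d := by
              rw [pyGetD_wrap ds current none (by omega) (by omega), hld]
              exact hcd
            rw [hgc, pySetD_wrap ds v _ (by omega) (by omega), hld]
            rfl
          have hcur : wrapIdx n current ≠ wrapIdx n v := by
            intro h; rw [← h, hcv] at hvis; exact absurd hvis (by simp)
          have hA : bfsRelax current (vis, ds, q) v =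
              (vis.set (wrapIdx n v) true, ds.set (wrapIdx n v) (some (d + 1)), q ++ [v]) := by
            show (if PySem.List.pyGetD vis v false = true then (vis, ds, q)
                  else (PySem.List.pySetD vis v true,
                        PySem.List.pySetD ds v ((PySem.List.pyGetD ds current none).map (· + 1)),
                        q ++ [v])) = _
            rw [hgv, hvis, hsv, hsd]
            simp
          have hB : bfsAltInner (vis, nxt) v =
              (vis.set (wrapIdx n v) true, nxt ++ [v]) := by
            show (if PySem.List.pyGetD vis v false = true then (vis, nxt)
                  else (PySem.List.pySetD vis v true, nxt ++ [v])) = _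
            rw [hgv, hvis, hsv]
            simp
          rw [hA, hB]
          have hvset : (vis.set (wrapIdx n v) true).getD (wrapIdx n v) false = true :=
            getD_set_self _ _ _ _ (by omega)
          have hdset : (ds.set (wrapIdx n v) (some (d + 1))).getD (wrapIdx n v) none =
              some (d + 1) := getD_set_self _ _ _ _ (by omega)
          obtain ⟨vis', ds', t', hAf, hBf, hlv', hld', hcnt', ht', hun'⟩ :=
            ih (vis.set (wrapIdx n v) true) (ds.set (wrapIdx n v) (some (d + 1)))
              (q ++ [v]) (nxt ++ [v]) (by simpa using hlv) (by simpa using hld)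
              (fun w hw => hL w (List.mem_cons_of_mem _ hw)) hc0 hcn
              (by rw [getD_set_ne _ _ _ _ _ (fun h => hcur h.symm)]; exact hcv)
              (by rw [getD_set_ne _ _ _ _ _ (fun h => hcur h.symm)]; exact hcd)
          have htne : ∀ w ∈ t', wrapIdx n w ≠ wrapIdx n v := by
            intro w hw h
            have := (ht' w hw).2.2.2.2
            rw [h, hvset] at this
            exact absurd this (by simp)
          refine ⟨vis', ds', v :: t', ?_, ?_, hlv', hld', ?_, ?_, ?_⟩
          · rw [hAf]; simp
          · rw [hBf]; simp
          · have hone := count_set_true vis (wrapIdx n v) (by omega) hvis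
            rw [hcnt', hone]
            simp only [List.length_cons]
            omega
          · intro w hw
            rcases List.mem_cons.mp hw with hw | hw
            · subst hw
              refine ⟨hv0, hvn, ?_, ?_, hvis⟩
              · rw [(hun' (wrapIdx n w) htne).2]; exact hvset
              · rw [(hun' (wrapIdx n w) htne).1]; exact hdset
            · obtain ⟨h1, h2, h3, h4, h5⟩ := ht' w hw
              refine ⟨h1, h2, h3, h4, ?_⟩
              rw [getD_set_ne _ _ _ _ _ (htne w hw).symm] at h5
              exact h5
          · intro j hj
            have hjv : wrapIdx n v ≠ j := hj v List.mem_cons_self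
            have := hun' j (fun w hw => hj w (List.mem_cons_of_mem _ hw))
            rw [this.1, this.2, getD_set_ne _ _ _ _ _ hjv, getD_set_ne _ _ _ _ _ hjv]
            exact ⟨rfl, rfl⟩

-- One whole frontier processed: A's queue loop run for f.length steps matches B's gather fold.
lemma layer_step (graph : List (List Int)) (n : Nat) (hn : graph.length = n)
    (hgraph : ∀ nbrs ∈ graph, ∀ v ∈ nbrs, -(n : Int) ≤ v ∧ v < (n : Int)) (d : Int)
    (f : List Int) :
    ∀ (fuel : Nat) (vis : List Bool) (ds : List (Option Int)) (nxt : List Int),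
    vis.length = n → ds.length = n →
    (∀ u ∈ f, -(n : Int) ≤ u ∧ u < (n : Int) ∧ vis.getD (wrapIdx n u) false = true ∧
      ds.getD (wrapIdx n u) none = some d) →
    ∃ (vis' : List Bool) (ds' : List (Option Int)) (t : List Int),
      bfsLoop graph (f.length + fuel) vis ds (f ++ nxt) = bfsLoop graph fuel vis' ds' (nxt ++ t) ∧
      f.foldl (bfsAltGather graph) (vis, nxt) = (vis', nxt ++ t) ∧
      vis'.length = n ∧ ds'.length = n ∧
      vis'.count true = vis.count true + t.length ∧
      (∀ v ∈ t, -(n : Int) ≤ v ∧ v < (n : Int) ∧ vis'.getD (wrapIdx n v) false = true ∧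
        ds'.getD (wrapIdx n v) none = some (d + 1) ∧ vis.getD (wrapIdx n v) false = false) ∧
      (∀ j : Nat, (∀ v ∈ t, wrapIdx n v ≠ j) →
        ds'.getD j none = ds.getD j none ∧ vis'.getD j false = vis.getD j false) := by
  induction f with
  | nil =>
      intro fuel vis ds nxt h1 h2 _
      exact ⟨vis, ds, [], by simp, by simp, h1, h2, by simp, by simp, fun j _ => ⟨rfl, rfl⟩⟩
  | cons u f ih =>
      intro fuel vis ds nxt hlv hld hf
      obtain ⟨hu0, hun, huv, hud⟩ := hf u List.mem_cons_self
      have hrow : ∀ v ∈ PySem.List.pyGetD graph u [], -(n : Int) ≤ v ∧ v < (n : Int) := by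
        have hmem : PySem.List.pyGetD graph u [] ∈ graph := by
          apply PySem.List.pyGetD_mem
          unfold PySem.Raise.InRange
          omega
        exact hgraph _ hmem
      obtain ⟨vis1, ds1, t1, hA1, hB1, hlv1, hld1, hcnt1, ht1, hun1⟩ :=
        inner_step n (PySem.List.pyGetD graph u []) u d vis ds (f ++ nxt) nxt
          hlv hld hrow hu0 hun huv hud
      -- A: one dequeue step
      have hstepA : bfsLoop graph ((u :: f).length + fuel) vis ds ((u :: f) ++ nxt) =
          bfsLoop graph (f.length + fuel) vis1 ds1 (f ++ (nxt ++ t1)) := by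
        have hlen : (u :: f).length + fuel = Nat.succ (f.length + fuel) := by
          simp [Nat.succ_eq_add_one]; omega
        rw [hlen]
        show bfsLoop graph (Nat.succ (f.length + fuel)) vis ds (u :: (f ++ nxt)) = _
        rw [bfsLoop]
        simp only [hA1, List.append_assoc]
      -- invariants for the remaining frontier
      have hf1 : ∀ w ∈ f, -(n : Int) ≤ w ∧ w < (n : Int) ∧
          vis1.getD (wrapIdx n w) false = true ∧ ds1.getD (wrapIdx n w) none = some d := by
        intro w hw
        obtain ⟨hw0, hwn, hwv, hwd⟩ := hf w (List.mem_cons_of_mem _ hw)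
        have hne : ∀ x ∈ t1, wrapIdx n x ≠ wrapIdx n w := by
          intro x hx h
          have := (ht1 x hx).2.2.2.2
          rw [h, hwv] at this
          exact absurd this (by simp)
        have := hun1 (wrapIdx n w) hne
        exact ⟨hw0, hwn, this.2 ▸ hwv, this.1 ▸ hwd⟩
      obtain ⟨vis', ds', t2, hA2, hB2, hlv', hld', hcnt2, ht2, hun2⟩ :=
        ih fuel vis1 ds1 (nxt ++ t1) hlv1 hld1 hf1
      refine ⟨vis', ds', t1 ++ t2, ?_, ?_, hlv', hld', ?_, ?_, ?_⟩
      · rw [hstepA, hA2]; simp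
      · rw [List.foldl_cons]
        have e1 : bfsAltGather graph (vis, nxt) u = (vis1, nxt ++ t1) := by
          unfold bfsAltGather; exact hB1
        rw [e1, hB2]
        simp
      · rw [hcnt2, hcnt1]
        simp [Nat.add_assoc]
      · intro w hw
        rcases List.mem_append.mp hw with hw | hw
        · obtain ⟨h1, h2, h3, h4, h5⟩ := ht1 w hw
          have hne : ∀ x ∈ t2, wrapIdx n x ≠ wrapIdx n w := by
            intro x hx h
            have := (ht2 x hx).2.2.2.2
            rw [h, h3] at this
            exact absurd this (by simp)
          have := hun2 (wrapIdx n w) hne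
          exact ⟨h1, h2, this.2 ▸ h3, this.1 ▸ h4, h5⟩
        · obtain ⟨h1, h2, h3, h4, h5⟩ := ht2 w hw
          refine ⟨h1, h2, h3, h4, ?_⟩
          by_cases hx : ∀ x ∈ t1, wrapIdx n x ≠ wrapIdx n w
          · rw [← (hun1 (wrapIdx n w) hx).2]
            exact h5
          · push Not at hx
            obtain ⟨x, hx1, hx2⟩ := hx
            rw [← hx2, (ht1 x hx1).2.2.1] at h5
            exact absurd h5 (by simp)
      · intro j hj
        have h2 := hun2 j (fun w hw => hj w (List.mem_append.mpr (Or.inr hw)))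
        have h1 := hun1 j (fun w hw => hj w (List.mem_append.mpr (Or.inl hw)))
        exact ⟨h2.1.trans h1.1, h2.2.trans h1.2⟩

-- The main simulation: from a layer boundary, A's finished distance maximum equals B's depth.
lemma main_loop (graph : List (List Int)) (n : Nat) (hn : graph.length = n)
    (hgraph : ∀ nbrs ∈ graph, ∀ v ∈ nbrs, -(n : Int) ≤ v ∧ v < (n : Int)) :
    ∀ (fuelB fuelA : Nat) (vis : List Bool) (ds : List (Option Int)) (f : List Int) (d : Int),
    vis.length = n → ds.length = n →
    f ≠ [] →
    (∀ u ∈ f, -(n : Int) ≤ u ∧ u < (n : Int) ∧ vis.getD (wrapIdx n u) false = true ∧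
      ds.getD (wrapIdx n u) none = some d) →
    0 ≤ d →
    (∀ (j : Nat) (k : Int), ds.getD j none = some k → 0 ≤ k ∧ k ≤ d) →
    f.length + (n - vis.count true) + 1 ≤ fuelA →
    (n - vis.count true) + 1 ≤ fuelB →
    bfsFinish (bfsLoop graph fuelA vis ds f) = bfsAltLoop graph fuelB vis f d := by
  intro fuelB
  induction fuelB with
  | zero => intro fuelA vis ds f d _ _ _ _ _ _ _ hfB; omega
  | succ m ihm =>
      intro fuelA vis ds f d hlv hld hfne hf hd0 hbound hfA hfB
      obtain ⟨u0, f', rfl⟩ := List.exists_cons_of_ne_nil hfne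
      set f := u0 :: f' with hfdef
      have hfA' : ∃ fuelA', fuelA = f.length + fuelA' ∧ (n - vis.count true) + 1 ≤ fuelA' :=
        ⟨fuelA - f.length, by omega, by omega⟩
      obtain ⟨fuelA', hfAeq, hfA'ge⟩ := hfA'
      obtain ⟨vis', ds', t, hA, hB, hlv', hld', hcnt, ht, hun⟩ :=
        layer_step graph n hn hgraph d f fuelA' vis ds [] hlv hld hf
      rw [List.append_nil] at hA
      rw [hfAeq, hA]
      -- B: one while iteration
      have hBloop : bfsAltLoop graph (m + 1) vis f d =
          if t = [] then d else bfsAltLoop graph m vis' t (d + 1) := by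
        show bfsAltLoop graph (Nat.succ m) vis (u0 :: f') d = _
        rw [bfsAltLoop]
        · rw [← hfdef, hB]
          simp
        · simp
      rw [hBloop]
      by_cases ht0 : t = []
      · subst ht0
        rw [if_pos rfl]
        rw [List.nil_append, bfsLoop_nil]
        -- t = [] means nothing was written: ds' = ds
        have hds : ds' = ds := by
          apply List.ext_getElem (by omega)
          intro j hj1 hj2
          have := (hun j (by simp)).1
          rwa [List.getD_eq_getElem ds' none hj1, List.getD_eq_getElem ds none hj2] at this
        subst hds
        obtain ⟨hu0a, hu0b, _, hu0d⟩ := hf u0 List.mem_cons_self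
        have hmem : some d ∈ ds' := by
          have h : wrapIdx n u0 < ds'.length := by
            have := wrapIdx_lt n u0 hu0a hu0b
            omega
          have := List.getD_eq_getElem ds' none h
          rw [hu0d] at this
          exact this ▸ List.getElem_mem h
        apply bfsFinish_eq ds' d hd0 hmem
        intro k hk
        obtain ⟨j, hj, he⟩ := List.mem_iff_getElem.mp hk
        have : ds'.getD j none = some k := by rw [List.getD_eq_getElem ds' none hj, he]
        exact (hbound j k this).2
      · rw [if_neg ht0, List.nil_append]
        have htlen : 1 ≤ t.length := by
          cases t with
          | nil => exact absurd rfl ht0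
          | cons a b => simp
        have hcle : vis'.count true ≤ n := by
          have := List.count_le_length (a := true) (l := vis')
          omega
        apply ihm fuelA' vis' ds' t (d + 1) hlv' hld' ht0
        · intro v hv
          obtain ⟨h1, h2, h3, h4, _⟩ := ht v hv
          exact ⟨h1, h2, h3, h4⟩
        · omega
        · intro j k hk
          by_cases hjt : ∃ v ∈ t, wrapIdx n v = j
          · obtain ⟨v, hv, rfl⟩ := hjt
            rw [(ht v hv).2.2.2.1] at hk
            have : k = d + 1 := by exact_mod_cast (Option.some_inj.mp hk).symm
            omega
          · push Not at hjt
            rw [(hun j hjt).1] at hk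
            have := hbound j k hk
            omega
        · omega
        · omega

theorem bfs_spec : Claim_equal_bfs := by
  intro graph start _ hpre
  obtain ⟨hs0, hsn, hgraph⟩ := hpre
  unfold Spec_bfs
  set n := graph.length with hn
  have hn1 : 1 ≤ n := by omega
  have hws : wrapIdx n start < n := wrapIdx_lt n start hs0 hsn
  -- initial states
  have hvis0 : PySem.List.pySetD (List.replicate n false) start true =
      (List.replicate n false).set (wrapIdx n start) true := by
    rw [pySetD_wrap _ _ _ (by simpa using hs0) (by simpa using hsn)]
    simp
  have hds0 : PySem.List.pySetD (List.replicate n (none : Option Int)) start (some 0) =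
      (List.replicate n (none : Option Int)).set (wrapIdx n start) (some 0) := by
    rw [pySetD_wrap _ _ _ (by simpa using hs0) (by simpa using hsn)]
    simp
  have hbound0 : ∀ (j : Nat) (k : Int),
      ((List.replicate n (none : Option Int)).set (wrapIdx n start) (some 0)).getD j none
        = some k → 0 ≤ k ∧ k ≤ 0 := by
    intro j k hk
    by_cases hje : wrapIdx n start = j
    · subst hje
      rw [getD_set_self _ _ _ _ (by simpa using hws)] at hk
      have : k = 0 := by exact_mod_cast (Option.some_inj.mp hk).symm
      omega
    · rw [getD_set_ne _ _ _ _ _ hje] at hk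
      by_cases hjn : j < n
      · rw [List.getD_eq_getElem _ _ (by simpa using hjn)] at hk
        simp at hk
      · rw [List.getD_eq_default _ _ (by simpa using hjn)] at hk
        simp at hk
  have hcnt0 : ((List.replicate n false).set (wrapIdx n start) true).count true = 1 := by
    have := count_set_true (List.replicate n false) (wrapIdx n start)
      (by simpa using hws) (by simp)
    have hz : List.count true (List.replicate n false) = 0 := by
      simp [List.count_replicate]
    omega
  have hmain := main_loop graph n hn.symm hgraph (n + 1) (n + 1)
    ((List.replicate n false).set (wrapIdx n start) true)
    ((List.replicate n (none : Option Int)).set (wrapIdx n start) (some 0))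
    [start] 0
    (by simp) (by simp) (by simp)
    (by
      intro u hu
      have : u = start := by simpa using hu
      subst this
      exact ⟨hs0, hsn, getD_set_self _ _ _ _ (by simpa using hws),
        getD_set_self _ _ _ _ (by simpa using hws)⟩)
    le_rfl hbound0
    (by simp only [List.length_cons, List.length_nil, hcnt0]; omega)
    (by simp only [hcnt0]; omega)
  show bfs graph start = bfs_alt graph start
  rw [bfs, bfs_alt]
  simp only [← hn, hvis0, hds0]
  exact hmain

-- ===== VERDICT (by name: the statement is the Claim_ definition above) =====
-- (bfs_spec is stated above with the lemmas it needs; restated here by name)
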